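-- pv_equiv track=rewrite | github.com/barteksmolkowski/adventofcode_2024 | Dni 2024/22_dzien.py | find_2000_number
-- ===== SOURCE A (Python) =====
-- def calculate_secret_number(secret_number):
--     secret_number = (((((secret_number ^ (secret_number * 64)) % 16777216) ^ (((secret_number ^ (secret_number * 64)) % 16777216) // 32)) % 16777216) ^ (((((secret_number ^ (secret_number * 64)) % 16777216) ^ (((secret_number ^ (secret_number * 64)) % 16777216) // 32)) % 16777216) * 2048)) % 16777216
--     return secret_number
--
-- def find_2000_number(initial_numbers):
--     results = []
--     for number in initial_numbers:
--         secret_number = number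
--         # Simulate 2000 steps
--         for _ in range(2000):
--             secret_number = calculate_secret_number(secret_number)
--         results.append(secret_number)
--     return results
-- ===== SOURCE B (Python) =====
-- MASK = (1 << 24) - 1
--
--
-- def _step(x):
--     # one PRNG round on a 24-bit value, as three xor-shift stages
--     x = (x ^ (x << 6)) & MASK
--     x = (x ^ (x >> 5)) & MASK
--     x = (x ^ (x << 11)) & MASK
--     return x
--
--
-- def _mat_apply(M, x):
--     # apply a GF(2)-linear map given by its 24 basis columns to x
--     r = 0
--     for c in M:
--         if x & 1:
--             r ^= c
--         x >>= 1
--     return r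
--
--
-- def _mat_mul(M, N):
--     # compose linear maps: columns of M∘N
--     return [_mat_apply(M, c) for c in N]
--
--
-- def find_2000_number(initial_numbers):
--     # The round is GF(2)-linear on 24 bits; raise its matrix to the 2000th
--     # power by binary exponentiation, then apply it once per number.
--     S = [_step(1 << j) for j in range(24)]
--     R = [1 << j for j in range(24)]  # identity
--     P = S
--     e = 2000
--     while e:
--         if e & 1:
--             R = _mat_mul(P, R)
--         P = _mat_mul(P, P)
--         e >>= 1
--     return [_mat_apply(R, n % (1 << 24)) for n in initial_numbers]
-- ===== Notes on version B (the rewrite author's own statement) =====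
-- stated objective: faster
-- what changed: The 2000-round xorshift PRNG step is GF(2)-linear on 24 bits, so B never iterates the round per number: it builds the 24x24 bit matrix of one round, raises it to the 2000th power by binary exponentiation on columns, and applies the resulting matrix once to each input reduced mod 2^24.
import Mathlib
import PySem

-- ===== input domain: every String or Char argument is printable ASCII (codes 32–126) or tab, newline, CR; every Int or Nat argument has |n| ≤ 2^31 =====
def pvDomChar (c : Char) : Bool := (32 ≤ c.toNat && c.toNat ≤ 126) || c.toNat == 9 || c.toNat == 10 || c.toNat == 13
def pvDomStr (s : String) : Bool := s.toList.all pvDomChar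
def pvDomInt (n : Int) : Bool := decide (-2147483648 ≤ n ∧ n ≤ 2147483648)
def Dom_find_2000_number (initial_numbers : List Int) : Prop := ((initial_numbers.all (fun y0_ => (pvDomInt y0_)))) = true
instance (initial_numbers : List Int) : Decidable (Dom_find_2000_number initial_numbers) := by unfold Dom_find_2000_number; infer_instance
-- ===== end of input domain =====

-- B replaces the per-number 2000-fold iteration of the GF(2)-linear PRNG round by one 24x24
-- bit matrix raised to the 2000th power by binary exponentiation, applied once per number; objective: faster.

-- ===== PORT A =====
def calculate_secret_number (secret_number : Int) : Int :=
  PySem.Int.mod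
    (PySem.Int.bxor
      (PySem.Int.mod
        (PySem.Int.bxor
          (PySem.Int.mod (PySem.Int.bxor secret_number (secret_number * 64)) 16777216)
          (PySem.Int.floordiv (PySem.Int.mod (PySem.Int.bxor secret_number (secret_number * 64)) 16777216) 32))
        16777216)
      ((PySem.Int.mod
        (PySem.Int.bxor
          (PySem.Int.mod (PySem.Int.bxor secret_number (secret_number * 64)) 16777216)
          (PySem.Int.floordiv (PySem.Int.mod (PySem.Int.bxor secret_number (secret_number * 64)) 16777216) 32))
        16777216) * 2048))
    16777216

def find_2000_number (initial_numbers : List Int) : List Int :=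
  initial_numbers.foldl
    (fun results number =>
      results ++ [(PySem.List.pyRange 0 2000 1).foldl (fun s _ => calculate_secret_number s) number])
    []

-- ===== PORT B =====
-- All values B manipulates are nonnegative 24-bit ints, so they are carried as Nat;
-- the one Python `%` on a possibly negative int is PySem.Int.mod (nonnegative result, .toNat exact).
def pvMask : Nat := 16777215

-- the three assignment lines of Source B's _step
def pvS1 (x : Nat) : Nat := (x ^^^ (x <<< 6)) &&& pvMask
def pvS2 (x : Nat) : Nat := (x ^^^ (x >>> 5)) &&& pvMask
def pvS3 (x : Nat) : Nat := (x ^^^ (x <<< 11)) &&& pvMask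

def pvStep (x : Nat) : Nat := pvS3 (pvS2 (pvS1 x))

-- Source B's _mat_apply: xor together the columns at the set bits of x (the loop over the
-- column list, shifting x right each step, rendered as structural recursion)
def pvMatApply : List Nat → Nat → Nat
  | [], _ => 0
  | c :: M, x => (if x &&& 1 = 1 then c else 0) ^^^ pvMatApply M (x >>> 1)

def pvMatMul (M N : List Nat) : List Nat := N.map (pvMatApply M)

-- Source B's while-loop of the binary exponentiation
def pvPowLoop (e : Nat) (R P : List Nat) : List Nat :=
  if e = 0 then R
  else pvPowLoop (e >>> 1) (if e &&& 1 = 1 then pvMatMul P R else R) (pvMatMul P P)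
  termination_by e
  decreasing_by simp [Nat.shiftRight_succ, Nat.shiftRight_zero]; omega

def pvToN (x : Int) : Nat := (PySem.Int.mod x 16777216).toNat

def find_2000_number_alt (initial_numbers : List Int) : List Int :=
  let S := (List.range 24).map (fun j => pvStep (1 <<< j))
  let R := pvPowLoop 2000 ((List.range 24).map (fun j => 1 <<< j)) S
  initial_numbers.map (fun n => ((pvMatApply R (pvToN n) : Nat) : Int))

-- ===== PRECONDITION & SPEC =====
def Spec_find_2000_number (initial_numbers : List Int) (out : List Int) : Prop := out = find_2000_number_alt initial_numbers
instance (initial_numbers : List Int) (out : List Int) : Decidable (Spec_find_2000_number initial_numbers out) := by unfold Spec_find_2000_number; infer_instance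

-- ===== CLAIM (what is proved, stated in full; the proofs are below) =====
def Claim_equal_find_2000_number : Prop := ∀ (initial_numbers : List Int), Dom_find_2000_number initial_numbers → Spec_find_2000_number initial_numbers (find_2000_number initial_numbers)

-- ===== LEMMAS AND PROOFS =====

theorem pvMask_eq : pvMask = 2 ^ 24 - 1 := by norm_num [pvMask]

-- GF(2)-linearity of the three stages and of the full step
theorem pvS1_xor (a b : Nat) : pvS1 (a ^^^ b) = pvS1 a ^^^ pvS1 b := by
  simp only [pvS1, Nat.shiftLeft_xor_distrib]
  rw [← Nat.and_xor_distrib_right]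
  congr 1
  rw [Nat.xor_assoc, Nat.xor_assoc]
  congr 1
  rw [← Nat.xor_assoc, ← Nat.xor_assoc, Nat.xor_comm b]

theorem pvS2_xor (a b : Nat) : pvS2 (a ^^^ b) = pvS2 a ^^^ pvS2 b := by
  simp only [pvS2, Nat.shiftRight_xor_distrib]
  rw [← Nat.and_xor_distrib_right]
  congr 1
  rw [Nat.xor_assoc, Nat.xor_assoc]
  congr 1
  rw [← Nat.xor_assoc, ← Nat.xor_assoc, Nat.xor_comm b]

theorem pvS3_xor (a b : Nat) : pvS3 (a ^^^ b) = pvS3 a ^^^ pvS3 b := by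
  simp only [pvS3, Nat.shiftLeft_xor_distrib]
  rw [← Nat.and_xor_distrib_right]
  congr 1
  rw [Nat.xor_assoc, Nat.xor_assoc]
  congr 1
  rw [← Nat.xor_assoc, ← Nat.xor_assoc, Nat.xor_comm b]

theorem pvStep_xor (a b : Nat) : pvStep (a ^^^ b) = pvStep a ^^^ pvStep b := by
  simp only [pvStep, pvS1_xor, pvS2_xor, pvS3_xor]

theorem pvStep_zero : pvStep 0 = 0 := by decide

theorem pvStep_lt (x : Nat) : pvStep x < 2 ^ 24 := by
  have h : pvStep x ≤ pvMask := Nat.and_le_right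
  rw [pvMask_eq] at h; omega

-- odd/even xor decomposition used by the basis lemma
theorem pv_xor_one (q : Nat) : 1 ^^^ 2 * q = 2 * q + 1 := by
  have h2q : 2 * q = q * 2 ^ 1 := by ring
  have h2q1 : 2 * q + 1 = 2 ^ 1 * q + 1 := by ring
  apply Nat.eq_of_testBit_eq
  intro i
  rw [Nat.testBit_xor, h2q1, Nat.testBit_two_pow_mul_add q (by norm_num) i, h2q, Nat.testBit_mul_two_pow]
  cases i with
  | zero => simp
  | succ i => simp [Nat.testBit_succ]

-- applying the matrix of a linear map computes the map (x below 2^k, k basis columns)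
theorem pvMatApply_basis : ∀ (k : Nat) (f : Nat → Nat),
    (∀ a b, f (a ^^^ b) = f a ^^^ f b) → f 0 = 0 →
    ∀ x, x < 2 ^ k → pvMatApply ((List.range k).map (fun j => f (1 <<< j))) x = f x := by
  intro k
  induction k with
  | zero =>
    intro f hf h0 x hx
    have : x = 0 := by simpa using hx
    subst this; simpa [pvMatApply] using h0.symm
  | succ k ih =>
    intro f hf h0 x hx
    rw [List.range_succ_eq_map, List.map_cons, List.map_map, pvMatApply]
    have hcols : (List.map ((fun j => f (1 <<< j)) ∘ Nat.succ) (List.range k))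
        = (List.range k).map (fun j => (fun y => f (2 * y)) (1 <<< j)) := by
      apply List.map_congr_left
      intro j _
      simp only [Function.comp]
      congr 1
      rw [Nat.shiftLeft_succ]
    rw [hcols]
    have hg : ∀ a b, (fun y => f (2 * y)) (a ^^^ b) = (fun y => f (2 * y)) a ^^^ (fun y => f (2 * y)) b := by
      intro a b
      simp only
      have : 2 * (a ^^^ b) = 2 * a ^^^ 2 * b := by
        have := @Nat.shiftLeft_xor_distrib 1 a b
        simpa [Nat.shiftLeft_succ, Nat.shiftLeft_zero, Nat.mul_comm] using this
      rw [this, hf]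
    have hx2 : x >>> 1 < 2 ^ k := by
      rw [Nat.shiftRight_succ, Nat.shiftRight_zero]
      rw [pow_succ] at hx
      omega
    rw [ih (fun y => f (2 * y)) hg (by simpa using h0) (x >>> 1) hx2]
    simp only [Nat.shiftRight_succ, Nat.shiftRight_zero, Nat.and_one_is_mod]
    by_cases hp : x % 2 = 1
    · rw [if_pos hp]
      have : (1 <<< 0 : Nat) = 1 := rfl
      rw [this, ← hf, pv_xor_one]
      congr 1
      omega
    · rw [if_neg hp]
      have hx0 : 2 * (x / 2) = x := by omega
      rw [hx0]
      simp

def pvColsOf (f : Nat → Nat) : List Nat := (List.range 24).map (fun j => f (1 <<< j))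

theorem pvMatMul_colsOf (f g : Nat → Nat)
    (hf : ∀ a b, f (a ^^^ b) = f a ^^^ f b) (hf0 : f 0 = 0)
    (hg : ∀ j, j < 24 → g (1 <<< j) < 2 ^ 24) :
    pvMatMul (pvColsOf f) (pvColsOf g) = pvColsOf (fun x => f (g x)) := by
  unfold pvMatMul pvColsOf
  rw [List.map_map]
  apply List.map_congr_left
  intro j hj
  simp only [Function.comp]
  exact pvMatApply_basis 24 f hf hf0 _ (hg j (List.mem_range.mp hj))

theorem pvPowLoop_inv : ∀ (e : Nat) (r p : Nat → Nat),
    (∀ a b, r (a ^^^ b) = r a ^^^ r b) → r 0 = 0 → (∀ j, j < 24 → r (1 <<< j) < 2 ^ 24) →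
    (∀ a b, p (a ^^^ b) = p a ^^^ p b) → p 0 = 0 → (∀ x, p x < 2 ^ 24) →
    pvPowLoop e (pvColsOf r) (pvColsOf p) = pvColsOf (fun x => p^[e] (r x)) := by
  intro e
  induction e using Nat.strong_induction_on with
  | _ e ih =>
    intro r p hr hr0 hrb hp hp0 hpb
    by_cases he : e = 0
    · subst he
      rw [pvPowLoop]
      simp
    · rw [pvPowLoop, if_neg he]
      have hstep : (if e &&& 1 = 1 then pvMatMul (pvColsOf p) (pvColsOf r) else pvColsOf r)
          = pvColsOf (fun x => p^[e % 2] (r x)) := by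
        rcases Nat.mod_two_eq_zero_or_one e with h | h
        · rw [Nat.and_one_is_mod, h]
          norm_num
        · rw [Nat.and_one_is_mod, h]
          norm_num
          rw [pvMatMul_colsOf p r hp hp0 hrb]
      have hpp : pvMatMul (pvColsOf p) (pvColsOf p) = pvColsOf (fun x => p (p x)) :=
        pvMatMul_colsOf p p hp hp0 (fun j _ => hpb _)
      rw [hstep, hpp]
      have hrec := ih (e >>> 1) (by simp [Nat.shiftRight_succ, Nat.shiftRight_zero]; omega)
        (fun x => p^[e % 2] (r x)) (fun x => p (p x))
        (by intro a b; simp only; rcases Nat.mod_two_eq_zero_or_one e with h | h <;> simp [h, hr, hp])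
        (by simp only; rcases Nat.mod_two_eq_zero_or_one e with h | h <;> simp [h, hr0, hp0])
        (by intro j hj; simp only; rcases Nat.mod_two_eq_zero_or_one e with h | h <;> simp [h]
            · exact hrb j hj
            · exact hpb _)
        (by intro a b; simp [hp]) (by simp [hp0]) (fun x => hpb _)
      rw [hrec]
      unfold pvColsOf
      apply List.map_congr_left
      intro j _
      simp only
      rw [Nat.shiftRight_succ, Nat.shiftRight_zero]
      have h2 : (fun y => p (p y)) = p^[2] := by
        funext y
        show p (p y) = p^[2] y
        simp [Function.iterate_succ_apply]
      rw [h2, ← Function.iterate_mul, ← Function.iterate_add_apply,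
        show 2 * (e / 2) + e % 2 = e by omega]

-- ===== A-side bridge: each Int stage of calculate_secret_number equals the Nat stage =====

theorem pvStage2 (u : Nat) :
    PySem.Int.mod (PySem.Int.bxor (u : Int) (PySem.Int.floordiv (u : Int) 32)) 16777216 = ((pvS2 u : Nat) : Int) := by
  have h32 : PySem.Int.floordiv (u : Int) 32 = ((u / 32 : Nat) : Int) := by
    exact_mod_cast PySem.Int.floordiv_natCast u 32
  rw [h32, PySem.Int.bxor_natCast]
  rw [show ((16777216 : Int)) = ((16777216 : Nat) : Int) by norm_num]
  rw [PySem.Int.mod_natCast]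
  congr 1
  rw [pvS2, pvMask_eq, Nat.and_two_pow_sub_one_eq_mod, Nat.shiftRight_eq_div_pow]

theorem pvStage3 (v : Nat) :
    PySem.Int.mod (PySem.Int.bxor (v : Int) ((v : Int) * 2048)) 16777216 = ((pvS3 v : Nat) : Int) := by
  rw [show ((v : Int) * 2048) = ((v * 2048 : Nat) : Int) by push_cast; ring]
  rw [PySem.Int.bxor_natCast]
  rw [show ((16777216 : Int)) = ((16777216 : Nat) : Int) by norm_num]
  rw [PySem.Int.mod_natCast]
  congr 1
  rw [pvS3, pvMask_eq, Nat.and_two_pow_sub_one_eq_mod, Nat.shiftLeft_eq]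

theorem pvStage1_nat (m0 : Nat) :
    (m0 ^^^ m0 * 64) % 16777216 = pvS1 (m0 % 16777216) := by
  rw [pvS1, pvMask_eq, Nat.and_two_pow_sub_one_eq_mod, Nat.shiftLeft_eq]
  rw [show (16777216 : Nat) = 2 ^ 24 by norm_num, show (2:Nat)^6 = 64 by norm_num]
  apply Nat.eq_of_testBit_eq
  intro i
  simp only [show ∀ y : Nat, y * 64 = y * 2 ^ 6 from fun y => by norm_num]
  simp only [Nat.testBit_mod_two_pow, Nat.testBit_xor, Nat.testBit_mul_two_pow]
  by_cases hi : i < 24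
  · simp [hi, show i - 6 < 24 by omega]
  · simp [hi]

theorem pvStage1_negNat (k : Nat) :
    (k ^^^ (64 * k + 63)) % 16777216 = pvS1 (16777215 - k % 16777216) := by
  rw [pvS1, pvMask_eq, Nat.and_two_pow_sub_one_eq_mod, Nat.shiftLeft_eq]
  rw [show (16777216 : Nat) = 2 ^ 24 by norm_num, show (2:Nat)^6 = 64 by norm_num]
  have hr : k % 2 ^ 24 < 2 ^ 24 := Nat.mod_lt _ (by norm_num)
  have hM : (16777215 - k % 2 ^ 24 : Nat) = 2 ^ 24 - (k % 2 ^ 24 + 1) := by omega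
  rw [hM]
  apply Nat.eq_of_testBit_eq
  intro i
  simp only [show ∀ y : Nat, y * 64 = y * 2 ^ 6 from fun y => by norm_num]
  rw [show (64 * k + 63 : Nat) = 2 ^ 6 * k + 63 by ring]
  simp only [Nat.testBit_mod_two_pow, Nat.testBit_xor, Nat.testBit_mul_two_pow,
    Nat.testBit_two_pow_sub_succ hr]
  simp only [Nat.testBit_two_pow_mul_add k (by norm_num : (63:Nat) < 2 ^ 6)]
  simp only [show (63 : Nat) = 2 ^ 6 - 1 by norm_num, Nat.testBit_two_pow_sub_one]
  by_cases hi : i < 24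
  · by_cases h6 : 6 ≤ i
    · simp [hi, h6, show ¬ i < 6 by omega, show i - 6 < 24 by omega]
    · simp [hi, h6, show i < 6 by omega]
  · simp [hi, show 6 ≤ i by omega, show ¬ i < 6 by omega]

theorem pvStage1 (x : Int) :
    PySem.Int.mod (PySem.Int.bxor x (x * 64)) 16777216 = ((pvS1 (pvToN x) : Nat) : Int) := by
  by_cases hx : 0 ≤ x
  · obtain ⟨m0, rfl⟩ : ∃ m0 : Nat, x = (m0 : Int) := ⟨x.toNat, by omega⟩
    rw [show ((m0 : Int) * 64) = ((m0 * 64 : Nat) : Int) by push_cast; ring, PySem.Int.bxor_natCast]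
    rw [show ((16777216 : Int)) = ((16777216 : Nat) : Int) by norm_num, PySem.Int.mod_natCast]
    have hto : pvToN (m0 : Int) = m0 % 16777216 := by
      simp only [pvToN, PySem.Int.mod, Int.fmod_eq_emod]
      norm_num
      omega
    rw [hto]
    exact_mod_cast pvStage1_nat m0
  · obtain ⟨k, rfl⟩ : ∃ k : Nat, x = -(k : Int) - 1 := ⟨(-x - 1).toNat, by omega⟩
    have hbx : PySem.Int.bxor (-(k : Int) - 1) ((-(k : Int) - 1) * 64) = ((k ^^^ (64 * k + 63) : Nat) : Int) := by
      rw [PySem.Int.bxor]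
      rw [if_neg (by omega), if_neg (by nlinarith)]
      congr 1
      have h1 : (-(-(k : Int) - 1) - 1).toNat = k := by omega
      have h2 : (-((-(k : Int) - 1) * 64) - 1).toNat = 64 * k + 63 := by omega
      rw [h1, h2]
    rw [hbx]
    rw [show ((16777216 : Int)) = ((16777216 : Nat) : Int) by norm_num, PySem.Int.mod_natCast]
    have hto : pvToN (-(k : Int) - 1) = 16777215 - k % 16777216 := by
      unfold pvToN
      have : PySem.Int.mod (-(k : Int) - 1) 16777216 = ((16777215 - k % 16777216 : Nat) : Int) := by
        simp only [PySem.Int.mod, Int.fmod_eq_emod]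
        norm_num
        omega
      rw [this]
      simp
    rw [hto]
    exact_mod_cast pvStage1_negNat k

theorem pvCalc_eq (x : Int) : calculate_secret_number x = ((pvStep (pvToN x) : Nat) : Int) := by
  unfold calculate_secret_number
  rw [pvStage1 x, pvStage2, pvStage3, pvStep]

theorem pvToN_cast (m : Nat) (h : m < 2 ^ 24) : pvToN (m : Int) = m := by
  simp only [pvToN, PySem.Int.mod, Int.fmod_eq_emod]
  norm_num
  omega

theorem pvIter_calc : ∀ (k : Nat) (x : Int),
    calculate_secret_number^[k + 1] x = ((pvStep^[k + 1] (pvToN x) : Nat) : Int) := by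
  intro k
  induction k with
  | zero => intro x; simpa using pvCalc_eq x
  | succ k ih =>
    intro x
    rw [Function.iterate_succ_apply, pvCalc_eq x, ih, pvToN_cast _ (pvStep_lt _),
      ← Function.iterate_succ_apply]

theorem pvFoldl_const {α β : Type} (f : β → β) : ∀ (l : List α) (b : β),
    l.foldl (fun s _ => f s) b = f^[l.length] b := by
  intro l
  induction l with
  | nil => intro b; rfl
  | cons a l ih => intro b; simp [List.foldl_cons, ih, Function.iterate_succ_apply]

theorem pvToN_lt (x : Int) : pvToN x < 2 ^ 24 := by
  have h1 := PySem.Int.mod_lt x (b := 16777216) (by norm_num)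
  have h2 := PySem.Int.mod_nonneg x (b := 16777216) (by norm_num)
  unfold pvToN; omega

theorem pvIterStep_xor (n : Nat) : ∀ a b, pvStep^[n] (a ^^^ b) = pvStep^[n] a ^^^ pvStep^[n] b := by
  induction n with
  | zero => intro a b; simp
  | succ n ih => intro a b; simp [Function.iterate_succ_apply, pvStep_xor, ih]

theorem pvIterStep_zero (n : Nat) : pvStep^[n] 0 = 0 := by
  induction n with
  | zero => simp
  | succ n ih => simp [Function.iterate_succ_apply, pvStep_zero, ih]

theorem pvShift_lt (j : Nat) (h : j < 24) : (1 <<< j : Nat) < 2 ^ 24 := by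
  rw [Nat.one_shiftLeft]
  exact Nat.pow_lt_pow_right (by norm_num) h

theorem pvRange2000_len : (PySem.List.pyRange 0 2000 1).length = 2000 := by
  rw [show ((2000 : Int)) = ((2000 : Nat) : Int) by norm_num, PySem.List.pyRange_zero_natCast]
  simp

-- ===== VERDICT (by name: the statement is the Claim_ definition above) =====
set_option maxRecDepth 8192 in
theorem find_2000_number_spec : Claim_equal_find_2000_number := by
  intro xs _
  unfold Spec_find_2000_number find_2000_number find_2000_number_alt
  rw [PySem.List.foldl_append_singleton_eq_map]
  simp only [List.nil_append]
  apply List.map_congr_left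
  intro n _
  rw [pvFoldl_const, pvRange2000_len,
    show (2000 : Nat) = 1999 + 1 from rfl, pvIter_calc 1999 n]
  have hid : ((List.range 24).map (fun j => (1 <<< j : Nat))) = pvColsOf (fun x => x) := rfl
  have hS : ((List.range 24).map (fun j => pvStep (1 <<< j))) = pvColsOf pvStep := rfl
  rw [hid, hS, pvPowLoop_inv 2000 (fun x => x) pvStep (fun a b => rfl) rfl
    (fun j hj => pvShift_lt j hj) pvStep_xor pvStep_zero pvStep_lt]
  congr 1
  exact (pvMatApply_basis 24 (fun x => pvStep^[2000] x)
    (fun a b => pvIterStep_xor 2000 a b) (pvIterStep_zero 2000) (pvToN n) (pvToN_lt n)).symm
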